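-- pv_equiv track=rewrite | github.com/nomdedev/Rexus.app | rexus/utils/sql_dialect_translator.py | _is_valid_table_name
-- ===== SOURCE A (Python) =====
-- import string
--
-- def _is_valid_table_name(table_name: str) -> bool:
--     """
--     Valida que el nombre de tabla sea seguro para prevenir SQL injection.
--
--     Args:
--         table_name: Nombre de tabla a validar
--
--     Returns:
--         True si el nombre es válido
--     """
--     if not table_name or not isinstance(table_name, str):
--         return False
--
--     # Solo permitir letras, números y guiones bajos
--     allowed_chars = string.ascii_letters + string.digits + '_'
--     if not all(c in allowed_chars for c in table_name):
--         return False
--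
--     # No debe empezar con número
--     if table_name[0].isdigit():
--         return False
--
--     # Longitud razonable
--     if len(table_name) > 128:
--         return False
--
--     # Lista negra de palabras clave SQL
--     sql_keywords = {'SELECT', 'INSERT', 'UPDATE', 'DELETE', 'DROP', 'CREATE', 'ALTER', 'EXEC', 'EXECUTE'}
--     if table_name.upper() in sql_keywords:
--         return False
--
--     return True
-- ===== SOURCE B (Python) =====
-- _SQL_KEYWORDS = frozenset({'SELECT', 'INSERT', 'UPDATE', 'DELETE', 'DROP', 'CREATE',
--                            'ALTER', 'EXEC', 'EXECUTE'})
--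
-- def _is_valid_table_name(table_name: str) -> bool:
--     # Single recursive scan: character class, first-character rule and the
--     # 128-length cap are all decided position by position in one pass.
--     if not isinstance(table_name, str) or table_name == "":
--         return False
--     if table_name.upper() in _SQL_KEYWORDS:
--         return False
--
--     def scan(i):
--         if i == len(table_name):
--             return True
--         if i > 127:            # a character at index 128+ means len > 128
--             return False
--         c = table_name[i]
--         if 'a' <= c <= 'z' or 'A' <= c <= 'Z' or c == '_':
--             return scan(i + 1)
--         if '0' <= c <= '9':
--             return i > 0 and scan(i + 1)
--         return False
--
--     return scan(0)
-- ===== Notes on version B (the rewrite author's own statement) =====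
-- stated objective: alternative
-- what changed: Replaces A's staged passes (an all()-scan over an allowed-character string, then a separate first-char isdigit check, then a length check) by a single recursive index-driven scan that decides character class, the first-character rule and the 128-length cap position by position in one pass, with the keyword test hoisted to the front; the scan bails out after index 128, so long inputs are not traversed in full.
import Mathlib
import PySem

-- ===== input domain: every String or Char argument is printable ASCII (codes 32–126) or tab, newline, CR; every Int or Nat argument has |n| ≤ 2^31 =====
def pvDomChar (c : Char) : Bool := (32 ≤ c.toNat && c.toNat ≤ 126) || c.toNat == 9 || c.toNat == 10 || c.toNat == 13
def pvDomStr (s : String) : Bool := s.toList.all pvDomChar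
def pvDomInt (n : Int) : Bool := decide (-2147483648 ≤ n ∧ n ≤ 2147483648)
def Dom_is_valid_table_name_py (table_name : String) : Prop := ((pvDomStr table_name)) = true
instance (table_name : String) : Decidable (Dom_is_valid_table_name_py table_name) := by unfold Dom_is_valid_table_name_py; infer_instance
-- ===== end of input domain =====

-- B replaces A's staged passes (allowed-character all()-scan, first-char digit check, length
-- check) by one recursive index-driven scan deciding all per-position rules in a single pass.

-- ===== PORT A =====
-- string.ascii_letters + string.digits + '_'
def pvAllowedChars : List Char :=
  "abcdefghijklmnopqrstuvwxyzABCDEFGHIJKLMNOPQRSTUVWXYZ0123456789_".toList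

def pvSqlKeywords : List (List Char) :=
  ["SELECT".toList, "INSERT".toList, "UPDATE".toList, "DELETE".toList, "DROP".toList,
   "CREATE".toList, "ALTER".toList, "EXEC".toList, "EXECUTE".toList]

def is_valid_table_name_py (table_name : String) : Bool :=
  -- if not table_name: return False   (isinstance is always true for a str argument)
  if table_name.toList = [] then false
  -- if not all(c in allowed_chars for c in table_name): return False
  else if ¬ (table_name.toList.all (fun c => pvAllowedChars.contains c)) then false
  -- if table_name[0].isdigit(): return False
  else if (PySem.List.pyGet? table_name.toList 0).elim false PySem.Chars.isdigit then false
  -- if len(table_name) > 128: return False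
  else if 128 < PySem.Chars.len table_name.toList then false
  -- if table_name.upper() in sql_keywords: return False
  else if pvSqlKeywords.contains (PySem.Chars.upper table_name.toList) then false
  else true

-- ===== PORT B =====
-- the inner recursive scan of Source B: recursion over the remaining characters, carrying the index
def pvScan : List Char → Nat → Bool
  | [], _ => true
  | c :: rest, i =>
    if 127 < i then false
    else if ('a' ≤ c && c ≤ 'z') || ('A' ≤ c && c ≤ 'Z') || c == '_' then pvScan rest (i + 1)
    else if '0' ≤ c && c ≤ '9' then decide (0 < i) && pvScan rest (i + 1)
    else false

def is_valid_table_name_py_alt (table_name : String) : Bool :=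
  if table_name.toList = [] then false
  else if pvSqlKeywords.contains (PySem.Chars.upper table_name.toList) then false
  else pvScan table_name.toList 0

-- ===== PRECONDITION & SPEC =====
def Spec_is_valid_table_name_py (table_name : String) (out : Bool) : Prop := out = is_valid_table_name_py_alt table_name
instance (table_name : String) (out : Bool) : Decidable (Spec_is_valid_table_name_py table_name out) := by unfold Spec_is_valid_table_name_py; infer_instance

-- ===== CLAIM (what is proved, stated in full; the proofs are below) =====
def Claim_equal_is_valid_table_name_py : Prop := ∀ (table_name : String), Dom_is_valid_table_name_py table_name → Spec_is_valid_table_name_py table_name (is_valid_table_name_py table_name)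

-- ===== LEMMAS AND PROOFS =====

-- charwise facts, proved by enumerating the (finite) code points below 128
theorem pv_char_bounded (P : Char → Bool) (h : ∀ n : Nat, n < 128 → P (Char.ofNat n) = true)
    (c : Char) (hc : c.toNat < 128) : P c = true := by
  have := h c.toNat hc
  rwa [Char.ofNat_toNat c] at this

theorem pv_dom_lt (c : Char) (h : pvDomChar c = true) : c.toNat < 128 := by
  simp [pvDomChar] at h
  omega

-- pvAllowedChars with the string literal expanded once, so kernel checks stay cheap
def pvAllowedLit : List Char := ['a', 'b', 'c', 'd', 'e', 'f', 'g', 'h', 'i', 'j', 'k', 'l', 'm', 'n', 'o', 'p', 'q', 'r', 's', 't', 'u', 'v', 'w', 'x', 'y', 'z', 'A', 'B', 'C', 'D', 'E', 'F', 'G', 'H', 'I', 'J', 'K', 'L', 'M', 'N', 'O', 'P', 'Q', 'R', 'S', 'T', 'U', 'V', 'W', 'X', 'Y', 'Z', '0', '1', '2', '3', '4', '5', '6', '7', '8', '9', '_']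

theorem pvAllowedChars_eq : pvAllowedChars = pvAllowedLit := by decide

-- B's first-branch character class = "allowed and not a digit"
set_option maxRecDepth 8192 in
theorem pv_class_first (c : Char) (h : pvDomChar c = true) :
    (('a' ≤ c && c ≤ 'z') || ('A' ≤ c && c ≤ 'Z') || c == '_')
      = (pvAllowedChars.contains c && !PySem.Chars.isdigit c) := by
  rw [pvAllowedChars_eq]
  exact beq_iff_eq.mp (pv_char_bounded
    (fun c => (('a' ≤ c && c ≤ 'z') || ('A' ≤ c && c ≤ 'Z') || c == '_')
        == (pvAllowedLit.contains c && !PySem.Chars.isdigit c))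
    (by decide) c (pv_dom_lt c h))

-- B's second-branch character class = Python's isdigit
set_option maxRecDepth 8192 in
theorem pv_class_digit (c : Char) (h : pvDomChar c = true) :
    ('0' ≤ c && c ≤ '9') = PySem.Chars.isdigit c := by
  exact beq_iff_eq.mp (pv_char_bounded
    (fun d => ('0' ≤ d && d ≤ '9') == PySem.Chars.isdigit d)
    (by decide) c (pv_dom_lt c h))

-- a digit is an allowed character
set_option maxRecDepth 8192 in
theorem pv_digit_allowed (c : Char) (h : pvDomChar c = true) :
    (PySem.Chars.isdigit c → pvAllowedChars.contains c = true) := by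
  intro hd
  rw [pvAllowedChars_eq]
  have := pv_char_bounded
    (fun d => !PySem.Chars.isdigit d || pvAllowedLit.contains d)
    (by decide) c (pv_dom_lt c h)
  simpa [hd] using this

-- tail invariant of the scan: from any index 1 ≤ i ≤ 128 it is exactly
-- "all remaining characters allowed ∧ the last index stays below 128"
theorem pv_scan_tail (l : List Char) (i : Nat) (h1 : 1 ≤ i) (h2 : i ≤ 128)
    (hdom : ∀ c ∈ l, pvDomChar c = true) :
    pvScan l i = (l.all (fun c => pvAllowedChars.contains c) && decide (l.length + i ≤ 128)) := by
  induction l generalizing i with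
  | nil => simp [pvScan, h2]
  | cons c rest ih =>
    have hc := hdom c (by simp)
    have hrest : ∀ d ∈ rest, pvDomChar d = true := fun d hd => hdom d (by simp [hd])
    by_cases hi : 127 < i
    · have : i = 128 := by omega
      subst this
      simp [pvScan]
    · have hrec := ih (i + 1) (by omega) (by omega) hrest
      rw [pvScan, if_neg hi, pv_class_first c hc]
      by_cases hd : PySem.Chars.isdigit c = true
      · have hall := pv_digit_allowed c hc hd
        have hmem : c ∈ pvAllowedChars := by simpa using hall
        rw [if_neg (by simp [hd]), pv_class_digit c hc, if_pos hd,
            show decide (0 < i) = true from by simp only [decide_eq_true_eq]; omega,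
            Bool.true_and, hrec,
            show rest.length + (i + 1) = (c :: rest).length + i from by simp; omega]
        simp [hmem]
      · have hd' : PySem.Chars.isdigit c = false := by simp at hd ⊢; exact hd
        by_cases ha : pvAllowedChars.contains c = true
        · have hmem : c ∈ pvAllowedChars := by simpa using ha
          rw [if_pos (by simp [hd']; exact hmem), hrec,
              show rest.length + (i + 1) = (c :: rest).length + i from by simp; omega]
          simp [hmem]
        · rw [if_neg (by simp_all), pv_class_digit c hc, if_neg (by simp [hd'])]
          simp_all

-- ===== VERDICT (by name: the statement is the Claim_ definition above) =====
theorem is_valid_table_name_py_spec : Claim_equal_is_valid_table_name_py := by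
  intro s hdom
  unfold Spec_is_valid_table_name_py is_valid_table_name_py is_valid_table_name_py_alt
  have hdom' : ∀ c ∈ s.toList, pvDomChar c = true := by
    simpa [Dom_is_valid_table_name_py, pvDomStr, List.all_eq_true] using hdom
  cases hs : s.toList with
  | nil => simp
  | cons c rest =>
    have hc : pvDomChar c = true := hdom' c (by simp [hs])
    have hrest : ∀ d ∈ rest, pvDomChar d = true := fun d hd => hdom' d (by simp [hs, hd])
    have hscan : pvScan (c :: rest) 0
        = ((('a' ≤ c && c ≤ 'z') || ('A' ≤ c && c ≤ 'Z') || c == '_') && pvScan rest 1) := by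
      rw [pvScan, if_neg (by omega)]
      by_cases h1 : (('a' ≤ c && c ≤ 'z') || ('A' ≤ c && c ≤ 'Z') || c == '_') = true
      · simp [h1]
      · rw [if_neg h1]
        by_cases h2 : ('0' ≤ c && c ≤ '9') = true <;> simp_all
    rw [hscan, pv_scan_tail rest 1 (by omega) (by omega) hrest, pv_class_first c hc]
    have hget : (PySem.List.pyGet? (c :: rest) 0).elim false PySem.Chars.isdigit
        = PySem.Chars.isdigit c := by
      simp [PySem.List.pyGet?, PySem.List.pyIdx?]
    have hlen : (128 < PySem.Chars.len (c :: rest)) ↔ ¬ (rest.length + 1 ≤ 128) := by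
      simp [PySem.Chars.len_eq]
    rw [hget]
    by_cases hk : pvSqlKeywords.contains (PySem.Chars.upper (c :: rest)) = true <;>
      by_cases hlen' : 128 < PySem.Chars.len (c :: rest) <;>
        cases hac : pvAllowedChars.contains c <;>
          cases har : rest.all (fun d => pvAllowedChars.contains d) <;>
            cases hdg : PySem.Chars.isdigit c <;>
              simp_all
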